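-- pv_equiv track=rewrite | github.com/hotelCA/els_of_prog_iview | p_4_4.py | find_closest_same_weight
-- ===== SOURCE A (Python) =====
-- def find_closest_same_weight(x):
--     lsb = x & 1
--     mask = 0b10
--     MAX_INT_SIZE = 64
--     for i in range(1, MAX_INT_SIZE):
--         if ((mask & x) >> i) != lsb:
--             x = x ^ (mask | (mask >> 1))
--             return x
--         mask = mask << 1
--
--     raise ValueError('X is all 0 or all 1')
-- ===== SOURCE B (Python) =====
-- def find_closest_same_weight(x):
--     if x & 1 == 0:
--         t = x & -x          # isolate lowest set bit (first bit differing from lsb 0)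
--         if t == 0 or t >= 1 << 64:   # no transition within A's fixed 64-bit scan
--             raise ValueError('X is all 0 or all 1')
--         return x - (t >> 1)
--     t = ~x & (x + 1)        # isolate lowest clear bit (first bit differing from lsb 1)
--     if t == 0 or t >= 1 << 64:
--         raise ValueError('X is all 0 or all 1')
--     return x + (t >> 1)
-- ===== Notes on version B (the rewrite author's own statement) =====
-- stated objective: simpler
-- what changed: Replaces the 64-step mask-scanning loop with a loop-free bit-isolation computation: x&-x (even x) or ~x&(x+1) (odd x) isolates the first bit differing from the LSB, and the answer is x -/+ half of it; B raises ValueError exactly where A does (no differing bit among bits 1..63).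
import Mathlib
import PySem

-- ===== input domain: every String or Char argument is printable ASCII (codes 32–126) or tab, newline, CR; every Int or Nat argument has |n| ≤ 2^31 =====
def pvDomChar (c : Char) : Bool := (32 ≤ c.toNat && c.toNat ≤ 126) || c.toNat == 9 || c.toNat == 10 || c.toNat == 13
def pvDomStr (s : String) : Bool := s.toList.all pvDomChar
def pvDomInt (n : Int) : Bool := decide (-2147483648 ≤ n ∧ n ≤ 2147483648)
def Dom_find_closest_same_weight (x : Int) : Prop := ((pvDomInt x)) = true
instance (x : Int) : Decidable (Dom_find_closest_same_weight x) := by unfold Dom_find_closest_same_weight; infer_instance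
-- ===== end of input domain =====

-- B replaces A's 64-step mask-scanning loop by a loop-free bit-isolation computation (simpler, no loop);
-- B raises ValueError on the same inputs as A.
-- ===== PORT A =====
-- the 'for i in range(1, 64)' loop; fuel = number of remaining iterations; 0 fuel = the ValueError (excluded by Pre_)
def pvA_loop (x lsb mask : Int) (i : Nat) : Nat → Int
  | 0 => 0
  | fuel+1 =>
    if (PySem.Int.band mask x) >>> i ≠ lsb then
      PySem.Int.bxor x (PySem.Int.bor mask (mask >>> (1:Nat)))
    else
      pvA_loop x lsb (mask <<< (1:Nat)) (i+1) fuel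

def find_closest_same_weight (x : Int) : Int :=
  pvA_loop x (PySem.Int.band x 1) 2 1 63

-- ===== PORT B =====
-- 't == 0 or t >= 1 << 64' is Source B's raise condition; a raise is the 0 branch (excluded by Pre_)
def find_closest_same_weight_alt (x : Int) : Int :=
  if PySem.Int.band x 1 = 0 then
    let t := PySem.Int.band x (-x)
    if t = 0 ∨ 18446744073709551616 ≤ t then 0 else x - (t >>> (1:Nat))
  else
    let t := PySem.Int.band (Int.not x) (x + 1)
    if t = 0 ∨ 18446744073709551616 ≤ t then 0 else x + (t >>> (1:Nat))

-- ===== PRECONDITION & SPEC =====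
-- Pre_ excludes exactly the inputs on which A (and likewise B) raises ValueError: those x whose
-- bits 0..63 are all equal (no bit among bits 1..63 differs from the LSB), i.e. x mod 2^64 is 0 or
-- 2^64 - 1; within Dom these are exactly x = 0 and x = -1. (18446744073709551616 = 2^64.)
def Pre_find_closest_same_weight (x : Int) : Prop :=
  x % 18446744073709551616 ≠ 0 ∧ x % 18446744073709551616 ≠ 18446744073709551615
instance (x : Int) : Decidable (Pre_find_closest_same_weight x) := by
  unfold Pre_find_closest_same_weight; infer_instance
def pvWitness_find_closest_same_weight : Int := 6

def Spec_find_closest_same_weight (x : Int) (out : Int) : Prop := out = find_closest_same_weight_alt x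
instance (x : Int) (out : Int) : Decidable (Spec_find_closest_same_weight x out) := by unfold Spec_find_closest_same_weight; infer_instance

-- ===== CLAIM (what is proved, stated in full; the proofs are below) =====
def Claim_equal_find_closest_same_weight : Prop := ∀ (x : Int), Dom_find_closest_same_weight x → Pre_find_closest_same_weight x → Spec_find_closest_same_weight x (find_closest_same_weight x)

-- ===== LEMMAS AND PROOFS =====

-- Nat-level bit-doubling identities (from Nat.land_bit / lor_bit / xor_bit)
theorem pvAnd00 (m n : Nat) : 2*m &&& 2*n = 2*(m &&& n) := by
  simpa [Nat.bit_false, Nat.bit_true] using Nat.land_bit false m false n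
theorem pvAnd01 (m n : Nat) : 2*m &&& (2*n+1) = 2*(m &&& n) := by
  simpa [Nat.bit_false, Nat.bit_true] using Nat.land_bit false m true n
theorem pvAnd10 (m n : Nat) : (2*m+1) &&& 2*n = 2*(m &&& n) := by
  simpa [Nat.bit_false, Nat.bit_true] using Nat.land_bit true m false n
theorem pvAnd11 (m n : Nat) : (2*m+1) &&& (2*n+1) = 2*(m &&& n)+1 := by
  simpa [Nat.bit_false, Nat.bit_true] using Nat.land_bit true m true n
theorem pvOr00 (m n : Nat) : 2*m ||| 2*n = 2*(m ||| n) := by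
  simpa [Nat.bit_false, Nat.bit_true] using Nat.lor_bit false m false n
theorem pvOr10 (m n : Nat) : (2*m+1) ||| 2*n = 2*(m ||| n)+1 := by
  simpa [Nat.bit_false, Nat.bit_true] using Nat.lor_bit true m false n
theorem pvOr11 (m n : Nat) : (2*m+1) ||| (2*n+1) = 2*(m ||| n)+1 := by
  simpa [Nat.bit_false, Nat.bit_true] using Nat.lor_bit true m true n
theorem pvXor00 (m n : Nat) : 2*m ^^^ 2*n = 2*(m ^^^ n) := by
  simpa [Nat.bit_false, Nat.bit_true] using Nat.xor_bit false m false n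
theorem pvXor01 (m n : Nat) : 2*m ^^^ (2*n+1) = 2*(m ^^^ n)+1 := by
  simpa [Nat.bit_false, Nat.bit_true] using Nat.xor_bit false m true n
theorem pvXor10 (m n : Nat) : (2*m+1) ^^^ 2*n = 2*(m ^^^ n)+1 := by
  simpa [Nat.bit_false, Nat.bit_true] using Nat.xor_bit true m false n
theorem pvXor11 (m n : Nat) : (2*m+1) ^^^ (2*n+1) = 2*(m ^^^ n) := by
  simpa [Nat.bit_false, Nat.bit_true] using Nat.xor_bit true m true n

-- normal forms of the PySem bitwise ops on ofNat/negSucc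
theorem pvNSneg (n : Nat) : ¬ (0:Int) ≤ Int.negSucc n := by rw [Int.negSucc_eq]; omega
theorem pvNSpos (n : Nat) : (0:Int) ≤ Int.ofNat n := by rw [Int.ofNat_eq_natCast]; omega
theorem pvNStoNat (n : Nat) : (-Int.negSucc n - 1).toNat = n := by rw [Int.negSucc_eq]; omega
theorem pvNtoNat (n : Nat) : (Int.ofNat n).toNat = n := rfl

theorem pvBandNN (m n : Nat) : PySem.Int.band (Int.ofNat m) (Int.ofNat n) = Int.ofNat (m &&& n) := by
  unfold PySem.Int.band
  rw [if_pos (pvNSpos m), if_pos (pvNSpos n), pvNtoNat, pvNtoNat, Int.ofNat_eq_natCast]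
theorem pvBandNP (m n : Nat) : PySem.Int.band (Int.ofNat m) (Int.negSucc n) = Int.ofNat (m - (m &&& n)) := by
  unfold PySem.Int.band
  rw [if_pos (pvNSpos m), if_neg (pvNSneg n), pvNtoNat, pvNStoNat, Int.ofNat_eq_natCast]
theorem pvBandPN (m n : Nat) : PySem.Int.band (Int.negSucc m) (Int.ofNat n) = Int.ofNat (n - (n &&& m)) := by
  unfold PySem.Int.band
  rw [if_neg (pvNSneg m), if_pos (pvNSpos n), pvNtoNat, pvNStoNat, Int.ofNat_eq_natCast]
theorem pvBandPP (m n : Nat) : PySem.Int.band (Int.negSucc m) (Int.negSucc n) = Int.negSucc (m ||| n) := by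
  unfold PySem.Int.band
  rw [if_neg (pvNSneg m), if_neg (pvNSneg n), pvNStoNat, pvNStoNat, Int.negSucc_eq]
  omega
theorem pvBorNN (m n : Nat) : PySem.Int.bor (Int.ofNat m) (Int.ofNat n) = Int.ofNat (m ||| n) := by
  unfold PySem.Int.bor
  rw [if_pos (pvNSpos m), if_pos (pvNSpos n), pvNtoNat, pvNtoNat, Int.ofNat_eq_natCast]
theorem pvBorNP (m n : Nat) : PySem.Int.bor (Int.ofNat m) (Int.negSucc n) = Int.negSucc (n - (n &&& m)) := by
  unfold PySem.Int.bor
  rw [if_pos (pvNSpos m), if_neg (pvNSneg n), pvNtoNat, pvNStoNat, Int.negSucc_eq]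
  omega
theorem pvBorPN (m n : Nat) : PySem.Int.bor (Int.negSucc m) (Int.ofNat n) = Int.negSucc (m - (m &&& n)) := by
  unfold PySem.Int.bor
  rw [if_neg (pvNSneg m), if_pos (pvNSpos n), pvNtoNat, pvNStoNat, Int.negSucc_eq]
  omega
theorem pvBorPP (m n : Nat) : PySem.Int.bor (Int.negSucc m) (Int.negSucc n) = Int.negSucc (m &&& n) := by
  unfold PySem.Int.bor
  rw [if_neg (pvNSneg m), if_neg (pvNSneg n), pvNStoNat, pvNStoNat, Int.negSucc_eq]
  omega
theorem pvBxorNN (m n : Nat) : PySem.Int.bxor (Int.ofNat m) (Int.ofNat n) = Int.ofNat (m ^^^ n) := by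
  unfold PySem.Int.bxor
  rw [if_pos (pvNSpos m), if_pos (pvNSpos n), pvNtoNat, pvNtoNat, Int.ofNat_eq_natCast]
theorem pvBxorNP (m n : Nat) : PySem.Int.bxor (Int.ofNat m) (Int.negSucc n) = Int.negSucc (m ^^^ n) := by
  unfold PySem.Int.bxor
  rw [if_pos (pvNSpos m), if_neg (pvNSneg n), pvNtoNat, pvNStoNat, Int.negSucc_eq]
  omega
theorem pvBxorPN (m n : Nat) : PySem.Int.bxor (Int.negSucc m) (Int.ofNat n) = Int.negSucc (m ^^^ n) := by
  unfold PySem.Int.bxor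
  rw [if_neg (pvNSneg m), if_pos (pvNSpos n), pvNtoNat, pvNStoNat, Int.negSucc_eq]
  omega
theorem pvBxorPP (m n : Nat) : PySem.Int.bxor (Int.negSucc m) (Int.negSucc n) = Int.ofNat (m ^^^ n) := by
  unfold PySem.Int.bxor
  rw [if_neg (pvNSneg m), if_neg (pvNSneg n), pvNStoNat, pvNStoNat, Int.ofNat_eq_natCast]

-- writing 2*a(+1) in ofNat/negSucc normal form
theorem pvTwoN (m : Nat) : 2 * Int.ofNat m = Int.ofNat (2*m) := by simp [Int.ofNat_eq_natCast]
theorem pvTwoP (m : Nat) : 2 * Int.negSucc m = Int.negSucc (2*m+1) := by simp [Int.negSucc_eq]; ring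
theorem pvAddN1 (m : Nat) : Int.ofNat m + 1 = Int.ofNat (m+1) := by simp [Int.ofNat_eq_natCast]
theorem pvAddP1 (m : Nat) : Int.negSucc (m+1) + 1 = Int.negSucc m := by
  rw [Int.negSucc_eq, Int.negSucc_eq]; push_cast; ring

-- Int-level doubling lemmas for the PySem ops
theorem pvBand0s (a b s : Int) (hs : s = 0 ∨ s = 1) :
    PySem.Int.band (2*a) (2*b+s) = 2 * PySem.Int.band a b := by
  rcases hs with hs | hs <;> subst hs <;>
    rcases a with m | m <;> rcases b with n | n <;>
      simp only [add_zero, pvTwoN, pvTwoP, pvAddN1, pvAddP1] <;>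
      simp only [pvBandNN, pvBandNP, pvBandPN, pvBandPP] <;>
      simp only [Int.ofNat_eq_natCast, Int.negSucc_eq]
  · have := pvAnd00 m n; omega
  · have := pvAnd01 m n; have := Nat.and_le_left (n := m) (m := n); omega
  · have := pvAnd01 n m; have := Nat.and_le_left (n := n) (m := m); omega
  · have := pvOr11 m n; omega
  · have := pvAnd01 m n; omega
  · have := pvAnd00 m n; have := Nat.and_le_left (n := m) (m := n); omega
  · have := pvAnd11 n m; have := Nat.and_le_left (n := n) (m := m); omega
  · have := pvOr10 m n; omega

theorem pvBand11 (a b : Int) :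
    PySem.Int.band (2*a+1) (2*b+1) = 2 * PySem.Int.band a b + 1 := by
  rcases a with m | m <;> rcases b with n | n <;>
    simp only [pvTwoN, pvTwoP, pvAddN1, pvAddP1] <;>
    simp only [pvBandNN, pvBandNP, pvBandPN, pvBandPP] <;>
      simp only [Int.ofNat_eq_natCast, Int.negSucc_eq]
  · have := pvAnd11 m n; omega
  · have := pvAnd10 m n; have := Nat.and_le_left (n := m) (m := n); omega
  · have := pvAnd10 n m; have := Nat.and_le_left (n := n) (m := m); omega
  · have := pvOr00 m n; omega

theorem pvBor00 (a b : Int) :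
    PySem.Int.bor (2*a) (2*b) = 2 * PySem.Int.bor a b := by
  rcases a with m | m <;> rcases b with n | n <;>
    simp only [pvTwoN, pvTwoP] <;>
    simp only [pvBorNN, pvBorNP, pvBorPN, pvBorPP] <;>
      simp only [Int.ofNat_eq_natCast, Int.negSucc_eq]
  · have := pvOr00 m n; omega
  · have := pvAnd10 n m; have := Nat.and_le_left (n := n) (m := m); omega
  · have := pvAnd10 m n; have := Nat.and_le_left (n := m) (m := n); omega
  · have := pvAnd11 m n; omega

theorem pvBxor00 (a b : Int) :
    PySem.Int.bxor (2*a) (2*b) = 2 * PySem.Int.bxor a b := by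
  rcases a with m | m <;> rcases b with n | n <;>
    simp only [pvTwoN, pvTwoP] <;>
    simp only [pvBxorNN, pvBxorNP, pvBxorPN, pvBxorPP] <;>
      simp only [Int.ofNat_eq_natCast, Int.negSucc_eq]
  · have := pvXor00 m n; omega
  · have := pvXor01 m n; omega
  · have := pvXor10 m n; omega
  · have := pvXor11 m n; omega

theorem pvBxor01 (a b : Int) :
    PySem.Int.bxor (2*a) (2*b+1) = 2 * PySem.Int.bxor a b + 1 := by
  rcases a with m | m <;> rcases b with n | n <;>
    simp only [pvTwoN, pvTwoP, pvAddN1, pvAddP1] <;>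
    simp only [pvBxorNN, pvBxorNP, pvBxorPN, pvBxorPP] <;>
      simp only [Int.ofNat_eq_natCast, Int.negSucc_eq]
  · have := pvXor01 m n; omega
  · have := pvXor00 m n; omega
  · have := pvXor11 m n; omega
  · have := pvXor10 m n; omega

theorem pvBxor11 (a b : Int) :
    PySem.Int.bxor (2*a+1) (2*b+1) = 2 * PySem.Int.bxor a b := by
  rcases a with m | m <;> rcases b with n | n <;>
    simp only [pvTwoN, pvTwoP, pvAddN1, pvAddP1] <;>
    simp only [pvBxorNN, pvBxorNP, pvBxorPN, pvBxorPP] <;>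
      simp only [Int.ofNat_eq_natCast, Int.negSucc_eq]
  · have := pvXor11 m n; omega
  · have := pvXor10 m n; omega
  · have := pvXor01 m n; omega
  · have := pvXor00 m n; omega

-- x & ~x = 0
theorem pvNotAnd : ∀ a : Int, PySem.Int.band a (-a-1) = 0 := by
  have key : ∀ n : Nat, ∀ a : Int, a.natAbs ≤ n → PySem.Int.band a (-a-1) = 0 := by
    intro n
    induction n with
    | zero =>
      intro a ha
      have : a = 0 := by omega
      subst this; decide
    | succ n ih =>
      intro a ha
      by_cases h0 : a = 0
      · subst h0; decide
      by_cases h1 : a = -1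
      · subst h1; decide
      by_cases h2 : a = 1
      · subst h2; decide
      rcases (by omega : a % 2 = 0 ∨ a % 2 = 1) with hr | hr
      · -- a even: a = 2u, -a-1 = 2(-u-1)+1
        have hband : PySem.Int.band a (-a-1)
            = PySem.Int.band (2*(a/2)) (2*(-(a/2)-1)+1) := by
          rw [show (2:Int)*(a/2) = a by omega, show (2:Int)*(-(a/2)-1)+1 = -a-1 by omega]
        rw [hband, pvBand0s _ _ _ (Or.inr rfl), ih (a/2) (by omega), mul_zero]
      · -- a odd: a = 2u+1, -a-1 = 2(-u-1)
        have hband : PySem.Int.band a (-a-1)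
            = PySem.Int.band (2*(-(a/2)-1)) (2*(a/2)+1) := by
          rw [show (2:Int)*(-(a/2)-1) = -a-1 by omega, show (2:Int)*(a/2)+1 = a by omega,
            PySem.Int.band_comm]
        rw [hband, pvBand0s _ _ _ (Or.inr rfl)]
        have ihb := ih (-(a/2)-1) (by omega)
        rw [show -(-(a/2)-1)-1 = a/2 by ring] at ihb
        rw [ihb, mul_zero]
  intro a; exact key a.natAbs a le_rfl

-- band of multiples of 2^k
theorem pvMul (k : Nat) (a b : Int) :
    PySem.Int.band (2^k * a) (2^k * b) = 2^k * PySem.Int.band a b := by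
  induction k generalizing a b with
  | zero => simp
  | succ k ih =>
    have h1 : (2:Int)^(k+1) * a = 2 * (2^k * a) := by ring
    have h2 : (2:Int)^(k+1) * b = 2 * (2^k * b) + 0 := by ring
    rw [h1, h2, pvBand0s _ _ _ (Or.inl rfl), ih]; ring

-- the isolated transition bit: (2^i·(2a+1)) & (2^i·(2(-a-1)+1)) = 2^i
theorem pvKey (i : Nat) (a : Int) :
    PySem.Int.band (2^i * (2*a+1)) (2^i * (2*(-a-1)+1)) = 2^i := by
  rw [pvMul, pvBand11, pvNotAnd]; ring

-- band with a single power of two reads the corresponding bit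
theorem pvBit : ∀ (j : Nat) (b c : Int), 0 ≤ c → c < 2^(j+1) →
    PySem.Int.band (2^j) (2^(j+1)*b + c) = if 2^j ≤ c then 2^j else 0 := by
  intro j
  induction j with
  | zero =>
    intro b c hc0 hc1
    have hc : c = 0 ∨ c = 1 := by omega
    rw [pow_zero, PySem.Int.band_comm, PySem.Int.band_one,
      PySem.Int.mod_eq_emod_of_pos (by norm_num)]
    rcases hc with hc | hc <;> subst hc <;> split_ifs <;> omega
  | succ j ih =>
    intro b c hc0 hc1
    have hpow : (2:Int)^(j+1+1) = 2*2^(j+1) := by ring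
    have hpow2 : (2:Int)^(j+1) = 2*2^j := by ring
    obtain ⟨c', r, hc, hr, hc'0, hc'1⟩ :
        ∃ c' r : Int, c = 2*c' + r ∧ (r = 0 ∨ r = 1) ∧ 0 ≤ c' ∧ c' < 2^(j+1) := by
      refine ⟨c/2, c%2, by omega, by omega, by omega, by omega⟩
    subst hc
    rw [show (2:Int)^(j+1+1)*b + (2*c' + r) = 2*(2^(j+1)*b + c') + r by ring,
      hpow2, pvBand0s _ _ _ hr, ← hpow2, ih b c' hc'0 hc'1]
    have hpj : (0:Int) < 2^j := by positivity
    split_ifs <;> omega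

theorem pvBit0 (j : Nat) (b c : Int) (h0 : 0 ≤ c) (h1 : c < 2^j) :
    PySem.Int.band (2^j) (2^(j+1)*b + c) = 0 := by
  have hp : (2:Int)^(j+1) = 2*2^j := by ring
  rw [pvBit j b c h0 (by omega)]
  exact if_neg (by omega)

theorem pvBit1 (j : Nat) (b c : Int) (h0 : 2^j ≤ c) (h1 : c < 2^(j+1)) :
    PySem.Int.band (2^j) (2^(j+1)*b + c) = 2^j := by
  have hp : (0:Int) < 2^j := by positivity
  rw [pvBit j b c (by omega) h1]
  exact if_pos h0

-- 2^(j+1) | 2^j = 2^(j+1) + 2^j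
theorem pvOrPow : ∀ j : Nat, PySem.Int.bor (2^(j+1)) (2^j) = 2^(j+1) + 2^j := by
  intro j
  induction j with
  | zero => decide
  | succ j ih =>
    have hB : (2:Int)^(j+1) = 2*2^j := by ring
    rw [show (2:Int)^(j+1+1) = 2*2^(j+1) by ring, hB, pvBor00, ← hB, ih]; ring

-- the returned xor, even case: clears bit j+1, sets bit j
theorem pvCeven : ∀ (j : Nat) (a : Int),
    PySem.Int.bxor (2^(j+2)*a + 2^(j+1)) (2^(j+1) + 2^j) = 2^(j+2)*a + 2^j := by
  intro j
  induction j with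
  | zero =>
    intro a
    rw [show (2:Int)^(0+2)*a + 2^(0+1) = 2*(2*a+1) by ring,
      show (2:Int)^(0+1) + 2^0 = 2*1+1 by norm_num, pvBxor01]
    have h5 := pvBxor11 a 0
    norm_num at h5
    rw [h5]; norm_num; ring
  | succ j ih =>
    intro a
    rw [show (2:Int)^(j+1+2)*a + 2^(j+1+1) = 2*(2^(j+2)*a + 2^(j+1)) by ring,
      show (2:Int)^(j+1+1) + 2^(j+1) = 2*(2^(j+1) + 2^j) by ring, pvBxor00, ih]
    ring

-- the returned xor, odd case: sets bit j+1, clears bit j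
theorem pvCodd : ∀ (j : Nat) (a : Int),
    PySem.Int.bxor (2^(j+2)*a + 2^(j+1) - 1) (2^(j+1) + 2^j) = 2^(j+2)*a + 2^(j+1) + 2^j - 1 := by
  intro j
  induction j with
  | zero =>
    intro a
    rw [show (2:Int)^(0+2)*a + 2^(0+1) - 1 = 2*(2*a)+1 by ring,
      show (2:Int)^(0+1) + 2^0 = 2*1+1 by norm_num, pvBxor11]
    have h5 := pvBxor01 a 0
    norm_num at h5
    rw [h5]; norm_num; ring
  | succ j ih =>
    intro a
    rw [show (2:Int)^(j+1+2)*a + 2^(j+1+1) - 1 = 2*(2^(j+2)*a + 2^(j+1) - 1)+1 by ring,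
      show (2:Int)^(j+1+1) + 2^(j+1) = 2*(2^(j+1) + 2^j) by ring,
      PySem.Int.bxor_comm, pvBxor01, PySem.Int.bxor_comm, ih]
    ring

-- shifts
theorem pvShiftRNat (m k : Nat) : ((m:Int) >>> k) = ((m >>> k : Nat) : Int) := rfl
theorem pvShiftR0 (k : Nat) : ((0:Int) >>> k) = 0 := by
  rw [show (0:Int) = ((0:Nat):Int) from rfl, pvShiftRNat]; simp
theorem pvPowShiftSelf (j : Nat) : ((2:Int)^j) >>> j = 1 := by
  rw [show ((2:Int)^j) = ((2^j : Nat) : Int) by push_cast; ring, pvShiftRNat,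
    Nat.shiftRight_eq_div_pow, Nat.div_self (by positivity)]
  rfl
theorem pvPowShiftOne (k : Nat) : ((2:Int)^(k+1)) >>> (1:Nat) = 2^k := by
  rw [show ((2:Int)^(k+1)) = ((2^(k+1) : Nat) : Int) by push_cast; ring, pvShiftRNat,
    Nat.shiftRight_eq_div_pow, show (2:Nat)^(k+1) = 2^k*2 by ring, pow_one,
    Nat.mul_div_cancel _ (by norm_num)]
  push_cast; ring
theorem pvShiftL1 (a : Int) : a <<< (1:Nat) = 2*a := by rw [Int.shiftLeft_eq]; ring

-- odd-part decomposition
theorem pvOddPart : ∀ x : Int, x ≠ 0 → ∃ (i : Nat) (a : Int), x = 2^i * (2*a+1) := by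
  have key : ∀ n : Nat, ∀ x : Int, x ≠ 0 → x.natAbs ≤ n → ∃ (i : Nat) (a : Int), x = 2^i * (2*a+1) := by
    intro n
    induction n with
    | zero => intro x hx h; exact absurd (by omega : x = 0) hx
    | succ n ih =>
      intro x hx h
      by_cases h2 : x % 2 = 1
      · exact ⟨0, x/2, by rw [pow_zero]; omega⟩
      · have hy : x = 2*(x/2) := by omega
        obtain ⟨i, a, ha⟩ := ih (x/2) (by omega) (by omega)
        exact ⟨i+1, a, by rw [hy, ha]; ring⟩
  intro x hx; exact key x.natAbs x hx le_rfl

-- size bound on the transition index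
theorem pvILe (i : Nat) (h : (2:Int)^i ≤ 2^31 + 1) : i ≤ 31 := by
  by_contra hc
  have h32 : (2:Int)^32 ≤ 2^i := pow_le_pow_right₀ (by norm_num) (by omega)
  norm_num at h32
  have : ((2:Int)^31 : Int) = 2147483648 := by norm_num
  rw [this] at h
  omega

-- A's loop on an even input x = 2^(k+2)a + 2^(k+1) (lowest set bit k+1)
theorem pvLoopEven (k : Nat) (a : Int) :
    ∀ (fuel j : Nat), 1 ≤ j → j ≤ k+1 → k+1-j < fuel →
      pvA_loop (2^(k+2)*a + 2^(k+1)) 0 ((2:Int)^j) j fuel = 2^(k+2)*a + 2^k := by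
  intro fuel
  induction fuel with
  | zero => intro j _ _ h; omega
  | succ fuel ih =>
    intro j hj1 hjk hf
    rcases Nat.lt_or_ge j (k+1) with hlt | hge
    · -- bit j of x is 0 = lsb: continue
      obtain ⟨m, hm⟩ : ∃ m, k = j + m := ⟨k - j, by omega⟩
      subst hm
      have hx : (2:Int)^(j+m+2)*a + 2^(j+m+1) = 2^(j+1)*(2^(m+1)*a + 2^m) + 0 := by ring
      have hband := pvBit0 j (2^(m+1)*a + 2^m) 0 le_rfl (by positivity)
      rw [pvA_loop, hx]
      simp only [hband, pvShiftR0]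
      rw [if_neg (by simp), pvShiftL1, show (2:Int)*2^j = 2^(j+1) by ring, ← hx]
      exact ih (j+1) (by omega) (by omega) (by omega)
    · -- j = k+1: bit j of x is 1 ≠ 0: return
      have hj : j = k+1 := by omega
      subst hj
      have hx : (2:Int)^(k+2)*a + 2^(k+1) = 2^(k+1+1)*a + 2^(k+1) := by ring
      have hpk : (0:Int) < 2^(k+1) := by positivity
      have hp2 : (2:Int)^(k+1+1) = 2*2^(k+1) := by ring
      have hband := pvBit1 (k+1) a (2^(k+1)) le_rfl (by omega)
      rw [pvA_loop, hx]
      simp only [hband, pvPowShiftSelf]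
      rw [if_pos (by norm_num), pvPowShiftOne, pvOrPow,
        show (2:Int)^(k+1+1)*a + 2^(k+1) = 2^(k+2)*a + 2^(k+1) by ring]
      exact pvCeven k a

-- A's loop on an odd input x = 2^(k+2)a + 2^(k+1) - 1 (lowest clear bit k+1)
theorem pvLoopOdd (k : Nat) (a : Int) :
    ∀ (fuel j : Nat), 1 ≤ j → j ≤ k+1 → k+1-j < fuel →
      pvA_loop (2^(k+2)*a + 2^(k+1) - 1) 1 ((2:Int)^j) j fuel = 2^(k+2)*a + 2^(k+1) + 2^k - 1 := by
  intro fuel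
  induction fuel with
  | zero => intro j _ _ h; omega
  | succ fuel ih =>
    intro j hj1 hjk hf
    rcases Nat.lt_or_ge j (k+1) with hlt | hge
    · -- bit j of x is 1 = lsb: continue
      obtain ⟨m, hm⟩ : ∃ m, k = j + m := ⟨k - j, by omega⟩
      subst hm
      have hx : (2:Int)^(j+m+2)*a + 2^(j+m+1) - 1
          = 2^(j+1)*(2^(m+1)*a + 2^m - 1) + (2^(j+1) - 1) := by ring
      have hpj : (0:Int) < 2^j := by positivity
      have hpj1 : (2:Int)^(j+1) = 2*2^j := by ring
      have hband := pvBit1 j (2^(m+1)*a + 2^m - 1) (2^(j+1) - 1) (by omega) (by omega)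
      rw [pvA_loop, hx]
      simp only [hband, pvPowShiftSelf]
      rw [if_neg (by simp), pvShiftL1, show (2:Int)*2^j = 2^(j+1) by ring, ← hx]
      exact ih (j+1) (by omega) (by omega) (by omega)
    · -- j = k+1: bit j of x is 0 ≠ 1: return
      have hj : j = k+1 := by omega
      subst hj
      have hpk : (0:Int) < 2^(k+1) := by positivity
      have hx : (2:Int)^(k+2)*a + 2^(k+1) - 1 = 2^(k+1+1)*a + (2^(k+1) - 1) := by ring
      have hband := pvBit0 (k+1) a (2^(k+1) - 1) (by omega) (by omega)
      rw [pvA_loop, hx]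
      simp only [hband, pvShiftR0]
      rw [if_pos (by norm_num), pvPowShiftOne, pvOrPow,
        show (2:Int)^(k+1+1)*a + (2^(k+1) - 1) = 2^(k+2)*a + 2^(k+1) - 1 by ring]
      exact pvCodd k a

theorem pvNotEq (x : Int) : Int.not x = -x - 1 := by
  rcases x with m | m
  · show Int.negSucc m = -(Int.ofNat m) - 1
    rw [Int.negSucc_eq, Int.ofNat_eq_natCast]
    ring
  · show Int.ofNat m = -(Int.negSucc m) - 1
    rw [Int.neg_negSucc, Int.ofNat_eq_natCast]
    push_cast; ring

-- ===== VERDICT (by name: the statement is the Claim_ definition above) =====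
theorem find_closest_same_weight_spec : Claim_equal_find_closest_same_weight := by
  intro x hdom hpre
  unfold Dom_find_closest_same_weight pvDomInt at hdom
  have hdom' : -2147483648 ≤ x ∧ x ≤ 2147483648 := by simpa using hdom
  unfold Pre_find_closest_same_weight at hpre
  have hx0 : x ≠ 0 := by rintro rfl; exact hpre.1 (by decide)
  have hx1 : x ≠ -1 := by rintro rfl; exact hpre.2 (by decide)
  unfold Spec_find_closest_same_weight
  have hband1 : PySem.Int.band x 1 = x % 2 := by
    rw [PySem.Int.band_one, PySem.Int.mod_eq_emod_of_pos (by norm_num)]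
  by_cases hpar : x % 2 = 0
  · -- even case: lowest set bit at index k+1
    obtain ⟨i, a, hxa⟩ := pvOddPart x hx0
    have hi : i ≠ 0 := by
      rintro rfl
      rw [pow_zero, one_mul] at hxa
      omega
    obtain ⟨k, rfl⟩ : ∃ k, i = k+1 := ⟨i-1, by omega⟩
    have hp : (0:Int) < 2^(k+1) := by positivity
    have hple : (2:Int)^(k+1) ≤ 2^31 + 1 := by
      rcases (by omega : 0 ≤ a ∨ a ≤ -1) with ha | ha
      · have h1 : (2:Int)^(k+1) * 1 ≤ 2^(k+1) * (2*a+1) :=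
          mul_le_mul_of_nonneg_left (by omega) (le_of_lt hp)
        rw [mul_one] at h1; omega
      · have h1 : (2:Int)^(k+1) * (2*a+1) ≤ 2^(k+1) * (-1) :=
          mul_le_mul_of_nonneg_left (by omega) (le_of_lt hp)
        omega
    have hk31 : k ≤ 30 := by have := pvILe (k+1) hple; omega
    have hxform : x = 2^(k+2)*a + 2^(k+1) := by rw [hxa]; ring
    have hA : find_closest_same_weight x = 2^(k+2)*a + 2^k := by
      unfold find_closest_same_weight
      rw [hband1, hpar, hxform]
      have hL := pvLoopEven k a 63 1 le_rfl (by omega) (by omega)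
      rw [show ((2:Int)^1) = 2 by norm_num] at hL
      exact hL
    have hB : find_closest_same_weight_alt x = 2^(k+2)*a + 2^k := by
      unfold find_closest_same_weight_alt
      rw [hband1, if_pos hpar]
      show (if PySem.Int.band x (-x) = 0 ∨ (18446744073709551616:Int) ≤ PySem.Int.band x (-x) then (0:Int)
            else x - (PySem.Int.band x (-x) >>> (1:Nat))) = 2^(k+2)*a + 2^k
      have ht : PySem.Int.band x (-x) = 2^(k+1) := by
        rw [hxa, show -((2:Int)^(k+1)*(2*a+1)) = 2^(k+1)*(2*(-a-1)+1) by ring, pvKey]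
      have hlt : (2:Int)^(k+1) < 18446744073709551616 := by
        have : ((2:Int)^31 : Int) = 2147483648 := by norm_num
        omega
      rw [ht, if_neg (by push Not; exact ⟨by omega, by omega⟩), pvPowShiftOne, hxform]
      ring
    rw [hA, hB]
  · -- odd case: lowest clear bit at index k+1
    have hpar1 : x % 2 = 1 := by omega
    obtain ⟨i, a, hxa⟩ := pvOddPart (x+1) (by omega)
    have hi : i ≠ 0 := by
      rintro rfl
      rw [pow_zero, one_mul] at hxa
      omega
    obtain ⟨k, rfl⟩ : ∃ k, i = k+1 := ⟨i-1, by omega⟩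
    have hp : (0:Int) < 2^(k+1) := by positivity
    have hple : (2:Int)^(k+1) ≤ 2^31 + 1 := by
      rcases (by omega : 0 ≤ a ∨ a ≤ -1) with ha | ha
      · have h1 : (2:Int)^(k+1) * 1 ≤ 2^(k+1) * (2*a+1) :=
          mul_le_mul_of_nonneg_left (by omega) (le_of_lt hp)
        rw [mul_one] at h1; omega
      · have h1 : (2:Int)^(k+1) * (2*a+1) ≤ 2^(k+1) * (-1) :=
          mul_le_mul_of_nonneg_left (by omega) (le_of_lt hp)
        omega
    have hk31 : k ≤ 30 := by have := pvILe (k+1) hple; omega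
    have hxform : x = 2^(k+2)*a + 2^(k+1) - 1 := by
      have h := hxa
      rw [show (2:Int)^(k+1)*(2*a+1) = 2^(k+2)*a + 2^(k+1) by ring] at h
      omega
    have hA : find_closest_same_weight x = 2^(k+2)*a + 2^(k+1) + 2^k - 1 := by
      unfold find_closest_same_weight
      rw [hband1, hpar1, hxform]
      have hL := pvLoopOdd k a 63 1 le_rfl (by omega) (by omega)
      rw [show ((2:Int)^1) = 2 by norm_num] at hL
      exact hL
    have hB : find_closest_same_weight_alt x = 2^(k+2)*a + 2^(k+1) + 2^k - 1 := by
      unfold find_closest_same_weight_alt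
      rw [hband1, if_neg (by omega)]
      show (if PySem.Int.band (Int.not x) (x+1) = 0 ∨ (18446744073709551616:Int) ≤ PySem.Int.band (Int.not x) (x+1) then (0:Int)
            else x + (PySem.Int.band (Int.not x) (x+1) >>> (1:Nat))) = 2^(k+2)*a + 2^(k+1) + 2^k - 1
      have ht : PySem.Int.band (Int.not x) (x+1) = 2^(k+1) := by
        rw [pvNotEq, show -x-1 = -(x+1) by ring, hxa,
          show -((2:Int)^(k+1)*(2*a+1)) = 2^(k+1)*(2*(-a-1)+1) by ring]
        have hkey := pvKey (k+1) (-a-1)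
        rw [show (2:Int)*(-(-a-1)-1)+1 = 2*a+1 by ring] at hkey
        exact hkey
      have hlt : (2:Int)^(k+1) < 18446744073709551616 := by
        have : ((2:Int)^31 : Int) = 2147483648 := by norm_num
        omega
      rw [ht, if_neg (by push Not; exact ⟨by omega, by omega⟩), pvPowShiftOne, hxform]
      ring
    rw [hA, hB]
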